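-- pv_equiv track=rewrite | github.com/MarMariMarisa/SoftDevI | practicum3-MarMariMarisa/3_dict.py | build_y_to_x
-- ===== SOURCE A (Python) =====
-- def build_y_to_x(x_to_y):
--     dictionary = dict()
--     for key in x_to_y:
--         for value in x_to_y[key]:
--             if not value in dictionary:
--                 a_set = set()
--                 for key in x_to_y:
--                     if value in x_to_y[key]:
--                             a_set.add(key)
--                 dictionary[value] = a_set
--     return dictionary
-- ===== SOURCE B (Python) =====
-- def build_y_to_x(x_to_y):
--     result = {}
--     for key, values in x_to_y.items():
--         for value in values:
--             result.setdefault(value, set()).add(key)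
--     return result
-- ===== Notes on version B (the rewrite author's own statement) =====
-- stated objective: faster
-- what changed: B inverts the mapping in one pass with setdefault, adding each key directly to its value's set, instead of A's rescan of the whole dict for every newly seen value.
import Mathlib
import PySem

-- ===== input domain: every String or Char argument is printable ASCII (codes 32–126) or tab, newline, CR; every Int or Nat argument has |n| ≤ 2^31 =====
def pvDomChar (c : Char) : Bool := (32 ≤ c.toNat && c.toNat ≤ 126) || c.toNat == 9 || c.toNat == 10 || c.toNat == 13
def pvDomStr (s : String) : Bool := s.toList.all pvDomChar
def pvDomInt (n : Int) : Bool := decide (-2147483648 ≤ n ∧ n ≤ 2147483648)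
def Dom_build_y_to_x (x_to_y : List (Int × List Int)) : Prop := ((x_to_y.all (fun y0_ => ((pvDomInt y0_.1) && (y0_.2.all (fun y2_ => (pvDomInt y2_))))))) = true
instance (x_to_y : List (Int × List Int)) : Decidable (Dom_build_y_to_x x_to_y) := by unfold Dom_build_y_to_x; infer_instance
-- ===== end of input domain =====

-- B replaces A's full rescan of the dict for every newly seen value by a single pass that adds
-- each key directly into its value's set (objective: faster).
-- The x_to_y parameter is a Python dict: both ports decode the association list with
-- PySem.Dict.ofList (insertion order, duplicate keys overwritten in place), exactly as dict(pairs) does.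

-- ===== PORT A =====
def build_y_to_x (x_to_y : List (Int × List Int)) : List (Int × List Int) :=
  let d := PySem.Dict.ofList x_to_y
  (d.keys.foldl (fun dictionary key =>
      (d.getD key []).foldl (fun dictionary value =>
        if !dictionary.contains value then
          dictionary.insert value
            (d.keys.foldl (fun a_set key2 =>
               if value ∈ d.getD key2 [] then PySem.Set.add a_set key2 else a_set)
             PySem.Set.empty)
        else dictionary) dictionary)
    PySem.Dict.empty).items

-- ===== PORT B =====
def build_y_to_x_alt (x_to_y : List (Int × List Int)) : List (Int × List Int) :=
  let d := PySem.Dict.ofList x_to_y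
  (d.items.foldl (fun result kv =>
      kv.2.foldl (fun result value =>
        result.modify value PySem.Set.empty (fun s => PySem.Set.add s kv.1)) result)
    PySem.Dict.empty).items

-- ===== PRECONDITION & SPEC =====
def Spec_build_y_to_x (x_to_y : List (Int × List Int)) (out : List (Int × List Int)) : Prop := out = build_y_to_x_alt x_to_y
instance (x_to_y : List (Int × List Int)) (out : List (Int × List Int)) : Decidable (Spec_build_y_to_x x_to_y out) := by unfold Spec_build_y_to_x; infer_instance

-- ===== CLAIM (what is proved, stated in full; the proofs are below) =====
def Claim_equal_build_y_to_x : Prop := ∀ (x_to_y : List (Int × List Int)), Dom_build_y_to_x x_to_y → Spec_build_y_to_x x_to_y (build_y_to_x x_to_y)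

-- ===== LEMMAS AND PROOFS =====

-- a fold over d.keys whose body only uses the looked-up value is a fold over d.items
theorem foldl_keys_getD {ν β : Type} (d : PySem.Dict Int ν) (hnd : d.keys.Nodup)
    (d0 : ν) (g : β → Int → ν → β) (init : β) :
    d.keys.foldl (fun b k => g b k (d.getD k d0)) init
      = d.items.foldl (fun b kv => g b kv.1 kv.2) init := by
  have hkeys : d.keys = d.items.map (·.1) := rfl
  rw [hkeys, List.foldl_map]
  exact PySem.List.foldl_congr_mem _ _ _ _ (fun acc kv hkv => by
    rw [PySem.Dict.getD_of_mem_items d (k := kv.1) (v := kv.2) (by simpa using hkv) hnd d0])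

-- the set A computes for a value, as a fold over the items
def pvFullSet (L : List (Int × List Int)) (v : Int) : List Int :=
  L.foldl (fun s kv => if v ∈ kv.2 then PySem.Set.add s kv.1 else s) PySem.Set.empty

-- A's step over one item, with the inserted set abstracted as c : Int → List Int
def pvStepA (c : Int → List Int) (acc : PySem.Dict Int (List Int)) (kv : Int × List Int) :
    PySem.Dict Int (List Int) :=
  kv.2.foldl (fun acc v => if !acc.contains v then acc.insert v (c v) else acc) acc

def pvStepB (acc : PySem.Dict Int (List Int)) (kv : Int × List Int) : PySem.Dict Int (List Int) :=
  kv.2.foldl (fun acc v => acc.modify v PySem.Set.empty (fun s => PySem.Set.add s kv.1)) acc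

-- ---- keys ----
theorem keysA_inner (c : Int → List Int) (ws : List Int) (acc : PySem.Dict Int (List Int)) :
    (ws.foldl (fun acc v => if !acc.contains v then acc.insert v (c v) else acc) acc).keys
      = PySem.Set.update acc.keys ws := by
  induction ws generalizing acc with
  | nil => rfl
  | cons w ws ih =>
    have hstep : (if !acc.contains w then acc.insert w (c w) else acc).keys
        = PySem.Set.add acc.keys w := by
      by_cases h : acc.contains w = true
      · simp [h, PySem.Set.add_of_mem ((PySem.Dict.contains_iff_mem_keys acc w).mp h)]
      · simp only [Bool.not_eq_true] at h
        have hwk : w ∉ acc.keys := fun hm =>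
          absurd ((PySem.Dict.contains_iff_mem_keys acc w).mpr hm) (by simp [h])
        simp [h, PySem.Dict.keys_insert_of_not_contains acc (c w) h,
          PySem.Set.add_of_not_mem hwk]
    simp only [List.foldl_cons, ih, hstep]
    rfl

theorem keysB_inner (k : Int) (ws : List Int) (acc : PySem.Dict Int (List Int)) :
    (ws.foldl (fun acc v => acc.modify v PySem.Set.empty (fun s => PySem.Set.add s k)) acc).keys
      = PySem.Set.update acc.keys ws := by
  induction ws generalizing acc with
  | nil => rfl
  | cons w ws ih =>
    have hstep : (acc.modify w PySem.Set.empty (fun s => PySem.Set.add s k)).keys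
        = PySem.Set.add acc.keys w := by
      rw [PySem.Dict.keys_modify]
      by_cases h : acc.contains w = true
      · rw [PySem.Dict.keys_insert_of_contains acc _ h,
          PySem.Set.add_of_mem ((PySem.Dict.contains_iff_mem_keys acc w).mp h)]
      · simp only [Bool.not_eq_true] at h
        have hwk : w ∉ acc.keys := fun hm =>
          absurd ((PySem.Dict.contains_iff_mem_keys acc w).mpr hm) (by simp [h])
        rw [PySem.Dict.keys_insert_of_not_contains acc _ h, PySem.Set.add_of_not_mem hwk]
    simp only [List.foldl_cons, ih, hstep]
    rfl

theorem keysA_outer (c : Int → List Int) (P : List (Int × List Int)) (acc : PySem.Dict Int (List Int)) :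
    (P.foldl (pvStepA c) acc).keys = PySem.Set.update acc.keys (P.flatMap (·.2)) := by
  induction P generalizing acc with
  | nil => rfl
  | cons kv P ih =>
    simp only [List.foldl_cons, ih, pvStepA, keysA_inner, List.flatMap_cons]
    simp [PySem.Set.update, List.foldl_append]

theorem keysB_outer (P : List (Int × List Int)) (acc : PySem.Dict Int (List Int)) :
    (P.foldl pvStepB acc).keys = PySem.Set.update acc.keys (P.flatMap (·.2)) := by
  induction P generalizing acc with
  | nil => rfl
  | cons kv P ih =>
    simp only [List.foldl_cons, ih, pvStepB, keysB_inner, List.flatMap_cons]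
    simp [PySem.Set.update, List.foldl_append]

-- ---- lookups ----
theorem getA_inner (c : Int → List Int) (ws : List Int) (acc : PySem.Dict Int (List Int)) (v : Int) :
    (ws.foldl (fun acc v => if !acc.contains v then acc.insert v (c v) else acc) acc).get? v
      = if acc.contains v = false ∧ v ∈ ws then some (c v) else acc.get? v := by
  induction ws generalizing acc with
  | nil => simp
  | cons w ws ih =>
    rw [List.foldl_cons, ih]
    by_cases hc : acc.contains w = true
    · have he : (if !acc.contains w then acc.insert w (c w) else acc) = acc := by simp [hc]
      rw [he]
      by_cases hv : v = w
      · subst hv; simp [hc]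
      · simp [List.mem_cons, hv]
    · simp only [Bool.not_eq_true] at hc
      have he : (if !acc.contains w then acc.insert w (c w) else acc) = acc.insert w (c w) := by
        simp [hc]
      rw [he]
      by_cases hv : v = w
      · subst hv
        simp [hc]
      · simp [PySem.Dict.contains_insert, PySem.Dict.get?_insert, hv, List.mem_cons]

theorem getA_outer (c : Int → List Int) (P : List (Int × List Int)) (acc : PySem.Dict Int (List Int)) (v : Int) :
    (P.foldl (pvStepA c) acc).get? v
      = if acc.contains v = false ∧ v ∈ P.flatMap (·.2) then some (c v) else acc.get? v := by
  induction P generalizing acc with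
  | nil => simp
  | cons kv P ih =>
    rw [List.foldl_cons, ih]
    have hcon : (pvStepA c acc kv).contains v
        = ((pvStepA c acc kv).get? v).isSome := PySem.Dict.contains_eq_isSome_get? _ v
    have hget : (pvStepA c acc kv).get? v
        = if acc.contains v = false ∧ v ∈ kv.2 then some (c v) else acc.get? v :=
      getA_inner c kv.2 acc v
    have haccc : acc.contains v = (acc.get? v).isSome := PySem.Dict.contains_eq_isSome_get? acc v
    rw [hget, hcon, hget]
    by_cases h1 : acc.contains v = true
    · have hsome : (acc.get? v).isSome = true := by rw [← haccc]; exact h1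
      simp [h1]
      intro hnone
      rw [hnone] at hsome; simp at hsome
    · simp only [Bool.not_eq_true] at h1
      by_cases h2 : v ∈ kv.2
      · simp [h1, h2, List.mem_flatMap]
      · have hi : (if acc.contains v = false ∧ v ∈ kv.2 then some (c v) else acc.get? v)
            = acc.get? v := by simp [h2]
        rw [hi, ← haccc, h1]
        have hmem : (v ∈ List.flatMap (fun x => x.2) (kv :: P))
            ↔ (v ∈ List.flatMap (fun x => x.2) P) := by
          simp [List.flatMap_cons, h2]
        simp only [hmem]

theorem getB_inner (k : Int) (ws : List Int) (acc : PySem.Dict Int (List Int)) (v : Int) :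
    (ws.foldl (fun acc v => acc.modify v PySem.Set.empty (fun s => PySem.Set.add s k)) acc).getD v []
      = if v ∈ ws then PySem.Set.add (acc.getD v []) k else acc.getD v [] := by
  induction ws generalizing acc with
  | nil => simp
  | cons w ws ih =>
    rw [List.foldl_cons, ih]
    have hmod : ∀ v', (acc.modify w ([] : List Int) (fun s => PySem.Set.add s k)).getD v' []
        = if v' = w then PySem.Set.add (acc.getD w []) k else acc.getD v' [] :=
      fun v' => PySem.Dict.getD_modify acc w v' ([] : List Int) (fun s => PySem.Set.add s k)
    by_cases hv : v = w
    · subst hv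
      by_cases hw : v ∈ ws
      · simp [hw, hmod]
      · simp [hw, hmod]
    · simp [hv, hmod, List.mem_cons]

theorem getB_outer (P : List (Int × List Int)) (acc : PySem.Dict Int (List Int)) (v : Int) :
    (P.foldl pvStepB acc).getD v []
      = P.foldl (fun s kv => if v ∈ kv.2 then PySem.Set.add s kv.1 else s) (acc.getD v []) := by
  induction P generalizing acc with
  | nil => rfl
  | cons kv P ih =>
    simp only [List.foldl_cons, pvStepB, ih, getB_inner]

-- ---- a dict is determined by its key list and its lookups ----
theorem dict_ext_keys_getD (d₁ d₂ : PySem.Dict Int (List Int))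
    (h₁ : d₁.keys.Nodup) (h₂ : d₂.keys.Nodup) (hk : d₁.keys = d₂.keys)
    (hg : ∀ v ∈ d₁.keys, d₁.getD v [] = d₂.getD v []) : d₁.items = d₂.items := by
  have hmap : d₁.items.map (·.1) = d₂.items.map (·.1) := hk
  have hlen : d₁.items.length = d₂.items.length := by
    have := congrArg List.length hmap; simpa using this
  apply List.ext_getElem hlen
  intro i hi1 hi2
  have hfst : d₁.items[i].1 = d₂.items[i].1 := by
    have h := congrArg (fun l => l[i]?) hmap
    simpa [List.getElem?_map, List.getElem?_eq_getElem, hi1, hi2] using h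
  have hm1 : d₁.items[i] ∈ d₁.items := List.getElem_mem hi1
  have hm2 : d₂.items[i] ∈ d₂.items := List.getElem_mem hi2
  have hv1 : d₁.getD d₁.items[i].1 [] = d₁.items[i].2 :=
    PySem.Dict.getD_of_mem_items d₁ (by simp [hm1]) h₁ []
  have hv2 : d₂.getD d₂.items[i].1 [] = d₂.items[i].2 :=
    PySem.Dict.getD_of_mem_items d₂ (by simp [hm2]) h₂ []
  have hkmem : d₁.items[i].1 ∈ d₁.keys := List.mem_map_of_mem hm1
  have hsnd : d₁.items[i].2 = d₂.items[i].2 := by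
    rw [← hv1, ← hv2, ← hfst, hg _ hkmem]
  exact Prod.ext hfst hsnd

-- ===== VERDICT (by name: the statement is the Claim_ definition above) =====
theorem build_y_to_x_spec : Claim_equal_build_y_to_x := by
  intro x_to_y _
  simp only [Spec_build_y_to_x, build_y_to_x, build_y_to_x_alt]
  set d := PySem.Dict.ofList x_to_y with hd
  have hnd : d.keys.Nodup := PySem.Dict.nodup_keys_ofList x_to_y
  -- A's outer loop over keys is the loop over items, and A's inner rescan is pvFullSet
  have hA : d.keys.foldl (fun dictionary key =>
      (d.getD key []).foldl (fun dictionary value =>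
        if !dictionary.contains value then
          dictionary.insert value
            (d.keys.foldl (fun a_set key2 =>
               if value ∈ d.getD key2 [] then PySem.Set.add a_set key2 else a_set)
             PySem.Set.empty)
        else dictionary) dictionary) PySem.Dict.empty
      = d.items.foldl (pvStepA (pvFullSet d.items)) PySem.Dict.empty := by
    rw [foldl_keys_getD d hnd [] (fun dict k val =>
      val.foldl (fun dictionary value =>
        if !dictionary.contains value then
          dictionary.insert value
            (d.keys.foldl (fun a_set key2 =>
               if value ∈ d.getD key2 [] then PySem.Set.add a_set key2 else a_set)
             PySem.Set.empty)
        else dictionary) dict) PySem.Dict.empty]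
    apply PySem.List.foldl_congr_mem
    intro acc kv _
    unfold pvStepA
    apply PySem.List.foldl_congr_mem
    intro acc2 v _
    rw [foldl_keys_getD d hnd [] (fun s k val =>
      if v ∈ val then PySem.Set.add s k else s) PySem.Set.empty]
    rfl
  rw [hA]
  have hB : d.items.foldl (fun result kv =>
      kv.2.foldl (fun result value =>
        result.modify value PySem.Set.empty (fun s => PySem.Set.add s kv.1)) result)
      PySem.Dict.empty = d.items.foldl pvStepB PySem.Dict.empty := rfl
  rw [hB]
  set DA := d.items.foldl (pvStepA (pvFullSet d.items)) PySem.Dict.empty with hDA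
  set DB := d.items.foldl pvStepB PySem.Dict.empty with hDB
  have hkA : DA.keys = PySem.Set.update PySem.Dict.empty.keys (d.items.flatMap (·.2)) :=
    keysA_outer _ _ _
  have hkB : DB.keys = PySem.Set.update PySem.Dict.empty.keys (d.items.flatMap (·.2)) :=
    keysB_outer _ _
  have hkeq : DA.keys = DB.keys := by rw [hkA, hkB]
  have hndA : DA.keys.Nodup := by
    rw [hkA]; exact PySem.Set.nodup_update _ _ List.nodup_nil
  have hndB : DB.keys.Nodup := hkeq ▸ hndA
  apply dict_ext_keys_getD DA DB hndA hndB hkeq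
  intro v hv
  have hvflat : v ∈ d.items.flatMap (·.2) := by
    have hvu := hkA ▸ hv
    rcases (PySem.Set.mem_update _ _ v).mp hvu with h | h
    · simp [PySem.Dict.keys_empty] at h
    · exact h
  have hgA : DA.get? v = some (pvFullSet d.items v) := by
    rw [hDA, getA_outer]
    simp [PySem.Dict.contains_empty, hvflat]
  have hgB : DB.getD v [] = pvFullSet d.items v := by
    rw [hDB, getB_outer]
    simp [PySem.Dict.getD_empty, pvFullSet]
  rw [PySem.Dict.getD_eq_get?_getD, hgA, hgB]
  rfl
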